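-- pv_equiv track=rewrite | github.com/112Hunter112/CausalGuard | scripts/download_datasets.py | injecagent_to_layer5_sessions
-- ===== SOURCE A (Python) =====
-- def injecagent_to_layer5_sessions(user_cases: list) -> list:
--     """Convert InjecAgent user_cases to Layer 5 format: list of [(task_type, tool_name), ...].
--     Each user case has one tool; we form 2-step sessions by pairing consecutive cases."""
--     sessions = []
--     for i, row in enumerate(user_cases):
--         tool = row.get("User Tool") or row.get("user_tool") or "unknown"
--         task_type = "user"
--         if i + 1 < len(user_cases):
--             next_row = user_cases[i + 1]
--             next_tool = next_row.get("User Tool") or next_row.get("user_tool") or "unknown"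
--             sessions.append([(task_type, tool), (task_type, next_tool)])
--         else:
--             sessions.append([(task_type, tool)])
--     return [s for s in sessions if len(s) >= 2]
-- ===== SOURCE B (Python) =====
-- def injecagent_to_layer5_sessions(user_cases: list) -> list:
--     """Walk the cases BACKWARDS carrying only the successor's tool, emit each
--     2-step session look-behind style, then reverse the collected output."""
--     out = []
--     succ_tool = None
--     for row in reversed(user_cases):
--         t = row.get("User Tool") or row.get("user_tool") or "unknown"
--         if succ_tool is not None:
--             out.append([("user", t), ("user", succ_tool)])
--         succ_tool = t
--     out.reverse()
--     return out
-- ===== Notes on version B (the rewrite author's own statement) =====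
-- stated objective: alternative
-- what changed: B traverses the cases in reverse with a single look-behind state variable holding the successor's tool (no indexing, no lookahead re-extraction, no length filter), appending each pair and reversing the result, where A does an indexed forward pass with a boundary-checked lookahead followed by a filter pass.
import Mathlib
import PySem

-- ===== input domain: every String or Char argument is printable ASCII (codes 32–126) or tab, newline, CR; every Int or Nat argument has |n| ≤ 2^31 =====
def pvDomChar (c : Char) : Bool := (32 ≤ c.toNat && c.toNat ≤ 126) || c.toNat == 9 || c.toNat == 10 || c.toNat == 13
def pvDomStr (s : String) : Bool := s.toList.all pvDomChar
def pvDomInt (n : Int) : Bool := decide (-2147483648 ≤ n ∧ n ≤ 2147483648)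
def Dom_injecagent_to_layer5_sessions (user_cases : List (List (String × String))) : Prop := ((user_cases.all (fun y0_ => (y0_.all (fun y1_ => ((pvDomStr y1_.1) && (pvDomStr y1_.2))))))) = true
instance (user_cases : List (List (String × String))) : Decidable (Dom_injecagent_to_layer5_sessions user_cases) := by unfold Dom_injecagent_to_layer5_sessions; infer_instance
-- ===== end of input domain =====

-- B replaces A's indexed forward pass (boundary-checked lookahead plus a final length filter)
-- by a reverse traversal carrying one look-behind state (the successor's tool), reversed at the end (objective: alternative).

-- ===== PORT A =====
-- row.get(k) on the dict (assoc list): first matching key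
def pvGetRow (row : List (String × String)) (k : String) : Option String :=
  (row.find? (fun p => p.1 == k)).map (·.2)

-- Python 'x or y' where x : Optional[str] (falsy = None or "")
def pvOrStr (x : Option String) (y : String) : String :=
  match x with
  | some s => if s = "" then y else s
  | none => y

-- tool = row.get("User Tool") or row.get("user_tool") or "unknown"
def pvToolA (row : List (String × String)) : String :=
  pvOrStr (pvGetRow row "User Tool") (pvOrStr (pvGetRow row "user_tool") "unknown")

def injecagent_to_layer5_sessions (user_cases : List (List (String × String))) : List (List (String × String)) :=
  let sessions := (PySem.List.enumerate user_cases).foldl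
    (fun sessions p =>
      if p.1 + 1 < (user_cases.length : Int) then
        sessions ++ [[("user", pvToolA p.2),
                      ("user", pvToolA ((PySem.List.pyGet? user_cases (p.1 + 1)).getD []))]]
      else
        sessions ++ [[("user", pvToolA p.2)]]) []
  sessions.filter (fun s => 2 ≤ s.length)

-- ===== PORT B =====
def pvToolB (row : List (String × String)) : String :=
  pvOrStr (pvGetRow row "User Tool") (pvOrStr (pvGetRow row "user_tool") "unknown")

-- one loop step of B: state = (out, succ_tool)
def pvStepB (st : List (List (String × String)) × Option String) (row : List (String × String)) :
    List (List (String × String)) × Option String :=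
  let t := pvToolB row
  (match st.2 with
   | some p => st.1 ++ [[("user", t), ("user", p)]]
   | none => st.1,
   some t)

def injecagent_to_layer5_sessions_alt (user_cases : List (List (String × String))) : List (List (String × String)) :=
  (user_cases.reverse.foldl pvStepB ([], none)).1.reverse

-- ===== PRECONDITION & SPEC =====
def Spec_injecagent_to_layer5_sessions (user_cases : List (List (String × String))) (out : List (List (String × String))) : Prop := out = injecagent_to_layer5_sessions_alt user_cases
instance (user_cases : List (List (String × String))) (out : List (List (String × String))) : Decidable (Spec_injecagent_to_layer5_sessions user_cases out) := by unfold Spec_injecagent_to_layer5_sessions; infer_instance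

-- ===== CLAIM (what is proved, stated in full; the proofs are below) =====
def Claim_equal_injecagent_to_layer5_sessions : Prop := ∀ (user_cases : List (List (String × String))), Dom_injecagent_to_layer5_sessions user_cases → Spec_injecagent_to_layer5_sessions user_cases (injecagent_to_layer5_sessions user_cases)

-- ===== LEMMAS AND PROOFS =====

-- canonical adjacent-pairing of a tool list
def pvPairs : List String → List (List (String × String))
  | a :: b :: rest => [("user", a), ("user", b)] :: pvPairs (b :: rest)
  | _ => []

-- B's step on the extracted tool value
def pvStepS (st : List (List (String × String)) × Option String) (t : String) :
    List (List (String × String)) × Option String :=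
  (match st.2 with
   | some p => st.1 ++ [[("user", t), ("user", p)]]
   | none => st.1,
   some t)

-- the reversed fold over the tool list builds pvPairs back-to-front and remembers the head
theorem pvB_fold (ts : List String) :
    ts.reverse.foldl pvStepS ([], none) = ((pvPairs ts).reverse, ts.head?) := by
  induction ts with
  | nil => rfl
  | cons a rest ih =>
    rw [List.reverse_cons, List.foldl_append, ih]
    cases rest with
    | nil => rfl
    | cons b r => simp [pvStepS, pvPairs]

-- fold that appends one element per step, chosen by a condition, is a map
theorem pvFoldlIfAppend {α β : Type} (l : List α) (c : α → Prop) [DecidablePred c]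
    (g₁ g₂ : α → β) (init : List β) :
    l.foldl (fun acc x => if c x then acc ++ [g₁ x] else acc ++ [g₂ x]) init
      = init ++ l.map (fun x => if c x then g₁ x else g₂ x) := by
  induction l generalizing init with
  | nil => simp
  | cons a t ih =>
    simp only [List.foldl_cons, List.map_cons]
    by_cases h : c a <;> simp [h, ih]

-- A's loop over the true suffix starting at index k yields the adjacent pairs of that suffix
theorem pvA_aux (l : List (List (String × String))) (s : List (List (String × String))) (k : Nat)
    (hs : l.drop k = s) :
    (((PySem.List.enumerate s (k : Int)).map (fun p =>
        if p.1 + 1 < (l.length : Int) then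
          [("user", pvToolA p.2), ("user", pvToolA ((PySem.List.pyGet? l (p.1 + 1)).getD []))]
        else
          [("user", pvToolA p.2)])).filter (fun s => 2 ≤ s.length)) = pvPairs (s.map pvToolA) := by
  match s with
  | [] => rfl
  | [a] =>
    have hlen : l.length - k = 1 := by
      have := congrArg List.length hs; simpa using this
    have hk : k < l.length := by
      by_contra h
      have : l.drop k = [] := List.drop_eq_nil_of_le (by omega)
      rw [hs] at this; simp at this
    have hnot : ¬ ((k : Int) + 1 < (l.length : Int)) := by
      have : k + 1 = l.length := by omega
      omega
    simp [PySem.List.enumerate_cons, PySem.List.enumerate_nil, hnot, pvPairs]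
  | a :: b :: rest =>
    have hk : k < l.length := by
      by_contra h
      have : l.drop k = [] := List.drop_eq_nil_of_le (by omega)
      rw [hs] at this; simp at this
    have hlt : (k : Int) + 1 < (l.length : Int) := by
      have hlen : l.length - k = rest.length + 2 := by
        have := congrArg List.length hs; simp at this; omega
      have : k + 1 < l.length := by omega
      omega
    have hdrop : l.drop (k + 1) = b :: rest := by
      rw [← List.tail_drop, hs]; rfl
    have hget : l[k + 1]? = some b := by
      have h0 : (l.drop (k + 1))[0]? = l[k + 1 + 0]? := List.getElem?_drop
      rw [hdrop] at h0
      simpa using h0.symm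
    have hnext : (PySem.List.pyGet? l ((k : Int) + 1)).getD [] = b := by
      have hc : ((k : Int) + 1) = ((k + 1 : Nat) : Int) := by push_cast; ring
      rw [hc, PySem.List.pyGet?_natCast, hget]
      rfl
    have ih := pvA_aux l (b :: rest) (k + 1) hdrop
    have hcast : (k : Int) + 1 = ((k + 1 : Nat) : Int) := by push_cast; ring
    simp only [PySem.List.enumerate_cons, List.map_cons, hlt, if_pos, hnext]
    rw [List.filter_cons_of_pos (by simp), hcast]
    simp only [PySem.List.enumerate_cons, List.map_cons] at ih
    rw [ih]
    simp [pvPairs]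

-- ===== VERDICT (by name: the statement is the Claim_ definition above) =====
theorem injecagent_to_layer5_sessions_spec : Claim_equal_injecagent_to_layer5_sessions := by
  intro l _
  show injecagent_to_layer5_sessions l = injecagent_to_layer5_sessions_alt l
  unfold injecagent_to_layer5_sessions injecagent_to_layer5_sessions_alt
  have hB : l.reverse.foldl pvStepB ([], none)
      = (l.map pvToolB).reverse.foldl pvStepS ([], none) := by
    have hf : pvStepB = fun st row => pvStepS st (pvToolB row) := by
      funext st row; rfl
    rw [← List.map_reverse, List.foldl_map, ← hf]
  rw [hB, pvB_fold, pvFoldlIfAppend, List.nil_append]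
  have hT : pvToolB = pvToolA := rfl
  rw [hT]
  have hA := pvA_aux l l 0 (by simp)
  simpa using hA
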